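-- pv_equiv track=rewrite | github.com/sollan/alma | Functions/KinematicsFunctions.py | detect_bodypart_mapping
-- ===== SOURCE A (Python) =====
-- def detect_bodypart_mapping(bodyparts_detected):
--     '''
--     Auto-detect bodypart naming convention and create mapping to standard names.
--     Handles: 'toe'/'toeR'/'toeL', 'iliac crest'/'crestR', etc.
--     Returns: dict mapping detected names to standard names, and list of standard bodyparts
--     '''
--     standard_bodyparts = ['toe', 'mtp', 'ankle', 'knee', 'hip', 'iliac crest']
--     bodypart_aliases = {
--         'toe': ['toe', 'toer', 'toel', 'toe_r', 'toe_l'],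
--         'mtp': ['mtp', 'mtpr', 'mtpl', 'mtp_r', 'mtp_l'],
--         'ankle': ['ankle', 'ankler', 'anklel', 'ankle_r', 'ankle_l'],
--         'knee': ['knee', 'kneer', 'kneel', 'knee_r', 'knee_l'],
--         'hip': ['hip', 'hipr', 'hipl', 'hip_r', 'hip_l'],
--         'iliac crest': ['iliac crest', 'crest', 'crestr', 'crestl', 'crest_r', 'crest_l',
--                         'iliac crestr', 'iliac crestl', 'iliacr', 'iliacl']
--     }
--
--     mapping = {}
--     found_bodyparts = []
--
--     for detected in bodyparts_detected:
--         detected_lower = detected.lower()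
--         for standard, aliases in bodypart_aliases.items():
--             if detected_lower in aliases:
--                 mapping[detected] = standard
--                 if standard not in found_bodyparts:
--                     found_bodyparts.append(standard)
--                 break
--
--     # If no mapping found, keep original names
--     if not mapping:
--         return {bp: bp for bp in bodyparts_detected}, bodyparts_detected
--
--     return mapping, found_bodyparts
-- ===== SOURCE B (Python) =====
-- def detect_bodypart_mapping(bodyparts_detected):
--     '''
--     Auto-detect bodypart naming convention and create mapping to standard names.
--     Rule-based re-implementation: no alias table at all -- recognise a name by
--     stripping an optional side suffix ('r'/'l', or '_r'/'_l') and checking the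
--     remaining stem, mapping 'crest'/'iliac' stems to 'iliac crest'.
--     '''
--     def std(stem):
--         return 'iliac crest' if stem in ('crest', 'iliac', 'iliac crest') else stem
--
--     def canonical(name):
--         s = name.lower()
--         if s in ('toe', 'mtp', 'ankle', 'knee', 'hip', 'crest', 'iliac crest'):
--             return std(s)
--         if s.endswith('r') or s.endswith('l'):
--             stem = s[:-1]
--             if stem in ('toe', 'mtp', 'ankle', 'knee', 'hip', 'crest', 'iliac', 'iliac crest'):
--                 return std(stem)
--             if stem.endswith('_') and stem[:-1] in ('toe', 'mtp', 'ankle', 'knee', 'hip', 'crest'):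
--                 return std(stem[:-1])
--         return None
--
--     mapping = {}
--     found_bodyparts = []
--     for detected in bodyparts_detected:
--         standard = canonical(detected)
--         if standard is not None:
--             mapping[detected] = standard
--             if standard not in found_bodyparts:
--                 found_bodyparts.append(standard)
--
--     if not mapping:
--         return {bp: bp for bp in bodyparts_detected}, bodyparts_detected
--     return mapping, found_bodyparts
-- ===== Notes on version B (the rewrite author's own statement) =====
-- stated objective: alternative
-- what changed: B drops the alias table entirely and classifies each name by rule: lowercase it, strip an optional side suffix ('r'/'l' or '_r'/'_l'), and map the remaining stem ('crest'/'iliac' stems to 'iliac crest'); A scans six hard-coded alias lists per name.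
import Mathlib
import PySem

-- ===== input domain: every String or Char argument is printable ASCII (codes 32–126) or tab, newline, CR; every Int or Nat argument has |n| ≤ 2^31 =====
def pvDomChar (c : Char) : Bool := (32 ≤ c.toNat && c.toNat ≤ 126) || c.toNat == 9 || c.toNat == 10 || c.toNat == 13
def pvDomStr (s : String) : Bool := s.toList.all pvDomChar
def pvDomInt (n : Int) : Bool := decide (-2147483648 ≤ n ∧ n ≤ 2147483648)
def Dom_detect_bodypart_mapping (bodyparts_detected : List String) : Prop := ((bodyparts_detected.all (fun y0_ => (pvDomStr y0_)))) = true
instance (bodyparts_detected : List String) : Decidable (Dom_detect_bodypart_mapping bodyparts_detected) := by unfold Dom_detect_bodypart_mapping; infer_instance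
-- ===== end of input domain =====

-- B replaces A's six hard-coded alias lists by a suffix-stripping rule (drop an
-- optional 'r'/'l' or '_r'/'_l' side marker, classify the stem); objective: alternative.

-- ===== PORT A =====
-- the literal alias dict of A, as an (standard, aliases) item list
def pvAliasTable : List (String × List String) :=
  [("toe", ["toe", "toer", "toel", "toe_r", "toe_l"]),
   ("mtp", ["mtp", "mtpr", "mtpl", "mtp_r", "mtp_l"]),
   ("ankle", ["ankle", "ankler", "anklel", "ankle_r", "ankle_l"]),
   ("knee", ["knee", "kneer", "kneel", "knee_r", "knee_l"]),
   ("hip", ["hip", "hipr", "hipl", "hip_r", "hip_l"]),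
   ("iliac crest", ["iliac crest", "crest", "crestr", "crestl", "crest_r", "crest_l",
                    "iliac crestr", "iliac crestl", "iliacr", "iliacl"])]

-- A's inner 'for standard, aliases in bodypart_aliases.items(): if detected_lower in aliases: …; break'
def pvFindStandard : List (String × List String) → String → Option String
  | [], _ => none
  | (standard, aliases) :: rest, s =>
      if s ∈ aliases then some standard else pvFindStandard rest s

def detect_bodypart_mapping (bodyparts_detected : List String) : (List (String × String)) × List String :=
  let st := bodyparts_detected.foldl
    (fun (st : PySem.Dict String String × List String) detected =>
      let detected_lower := PySem.Str.lower detected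
      match pvFindStandard pvAliasTable detected_lower with
      | some standard =>
          (st.1.insert detected standard,
           if standard ∈ st.2 then st.2 else st.2 ++ [standard])
      | none => st)
    (PySem.Dict.empty, [])
  if st.1.items.isEmpty then
    ((bodyparts_detected.foldl (fun d bp => d.insert bp bp)
        (PySem.Dict.empty : PySem.Dict String String)).items,
     bodyparts_detected)
  else
    (st.1.items, st.2)

-- ===== PORT B =====
-- std(stem): 'crest'/'iliac'/'iliac crest' → 'iliac crest', else the stem itself
def pvStd (stem : String) : String :=
  if stem ∈ ["crest", "iliac", "iliac crest"] then "iliac crest" else stem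

-- canonical(name): lowercase, then match directly, after stripping 'r'/'l', or after stripping '_r'/'_l'
def pvCanonical (name : String) : Option String :=
  let s := PySem.Str.lower name
  if s ∈ ["toe", "mtp", "ankle", "knee", "hip", "crest", "iliac crest"] then
    some (pvStd s)
  else if PySem.Str.endswith s "r" || PySem.Str.endswith s "l" then
    let stem := PySem.Str.slice s none (some (-1))
    if stem ∈ ["toe", "mtp", "ankle", "knee", "hip", "crest", "iliac", "iliac crest"] then
      some (pvStd stem)
    else if PySem.Str.endswith stem "_" &&
            decide (PySem.Str.slice stem none (some (-1)) ∈ ["toe", "mtp", "ankle", "knee", "hip", "crest"]) then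
      some (pvStd (PySem.Str.slice stem none (some (-1))))
    else none
  else none

def detect_bodypart_mapping_alt (bodyparts_detected : List String) : (List (String × String)) × List String :=
  let st := bodyparts_detected.foldl
    (fun (st : PySem.Dict String String × List String) detected =>
      match pvCanonical detected with
      | some standard =>
          (st.1.insert detected standard,
           if standard ∈ st.2 then st.2 else st.2 ++ [standard])
      | none => st)
    (PySem.Dict.empty, [])
  if st.1.items.isEmpty then
    ((bodyparts_detected.foldl (fun d bp => d.insert bp bp)
        (PySem.Dict.empty : PySem.Dict String String)).items,
     bodyparts_detected)
  else
    (st.1.items, st.2)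

-- ===== PRECONDITION & SPEC =====
def Spec_detect_bodypart_mapping (bodyparts_detected : List String) (out : (List (String × String)) × List String) : Prop := out = detect_bodypart_mapping_alt bodyparts_detected
instance (bodyparts_detected : List String) (out : (List (String × String)) × List String) : Decidable (Spec_detect_bodypart_mapping bodyparts_detected out) := by unfold Spec_detect_bodypart_mapping; infer_instance

-- ===== CLAIM (what is proved, stated in full; the proofs are below) =====
def Claim_equal_detect_bodypart_mapping : Prop := ∀ (bodyparts_detected : List String), Dom_detect_bodypart_mapping bodyparts_detected → Spec_detect_bodypart_mapping bodyparts_detected (detect_bodypart_mapping bodyparts_detected)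

-- ===== LEMMAS AND PROOFS =====

-- every string on which A's alias scan succeeds
def pvAllAliases : List String :=
  ["toe", "toer", "toel", "toe_r", "toe_l",
   "mtp", "mtpr", "mtpl", "mtp_r", "mtp_l",
   "ankle", "ankler", "anklel", "ankle_r", "ankle_l",
   "knee", "kneer", "kneel", "knee_r", "knee_l",
   "hip", "hipr", "hipl", "hip_r", "hip_l",
   "iliac crest", "crest", "crestr", "crestl", "crest_r", "crest_l",
   "iliac crestr", "iliac crestl", "iliacr", "iliacl"]

-- a string that ends with c and whose s[:-1] is u is u followed by c
theorem pv_recomb (s u : String) (c : Char)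
    (hend : PySem.Str.endswith s (String.ofList [c]) = true)
    (hdrop : PySem.Str.slice s none (some (-1)) = u) :
    s = String.ofList (u.toList ++ [c]) := by
  have hsuf : [c] <:+ s.toList := by
    simpa [PySem.Chars.endswith_iff] using hend
  obtain ⟨w, hw⟩ := hsuf
  have hu : u.toList = w := by
    have := PySem.Str.slice_to_neg_one s
    rw [hdrop, ← hw, List.dropLast_concat] at this
    exact this
  apply String.toList_inj.mp
  rw [String.toList_ofList, hu, hw]

-- A's scan returns none off the alias set
theorem pv_find_none (t : String) (h : t ∉ pvAllAliases) :
    pvFindStandard pvAliasTable t = none := by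
  simp only [pvAllAliases, List.mem_cons, List.not_mem_nil, or_false, not_or] at h
  obtain ⟨h1, h2, h3, h4, h5, h6, h7, h8, h9, h10, h11, h12, h13, h14, h15, h16, h17, h18,
    h19, h20, h21, h22, h23, h24, h25, h26, h27, h28, h29, h30, h31, h32, h33, h34, h35⟩ := h
  simp [pvFindStandard, pvAliasTable, h1, h2, h3, h4, h5, h6, h7, h8, h9, h10, h11, h12, h13,
    h14, h15, h16, h17, h18, h19, h20, h21, h22, h23, h24, h25, h26, h27, h28, h29, h30, h31,
    h32, h33, h34, h35]

-- B's rule computes exactly A's first-matching-category scan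
theorem pv_rule_eq_scan (name : String) :
    pvCanonical name = pvFindStandard pvAliasTable (PySem.Str.lower name) := by
  unfold pvCanonical
  generalize PySem.Str.lower name = t
  by_cases hall : t ∈ pvAllAliases
  · fin_cases hall <;> rfl
  · rw [pv_find_none t hall]
    rw [if_neg (by
      intro hm
      rcases (by simpa using hm) with h|h|h|h|h|h|h <;>
        exact hall (by rw [h]; decide))]
    by_cases hr : PySem.Str.endswith t "r" = true
    · rw [if_pos (by simp only [hr, Bool.true_or])]
      rw [if_neg (by
        intro hm
        rcases (by simpa using hm) with h|h|h|h|h|h|h|h <;>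
          exact hall (by rw [pv_recomb t _ 'r' hr h]; decide))]
      rw [if_neg (by
        intro hm
        rw [Bool.and_eq_true, decide_eq_true_iff] at hm
        obtain ⟨hu, hm2⟩ := hm
        rcases (by simpa using hm2) with h|h|h|h|h|h <;>
          exact hall (by
            rw [pv_recomb t _ 'r' hr rfl, pv_recomb _ _ '_' hu h]; decide))]
    · by_cases hl : PySem.Str.endswith t "l" = true
      · rw [if_pos (by simp only [hl, Bool.or_true])]
        rw [if_neg (by
          intro hm
          rcases (by simpa using hm) with h|h|h|h|h|h|h|h <;>
            exact hall (by rw [pv_recomb t _ 'l' hl h]; decide))]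
        rw [if_neg (by
          intro hm
          rw [Bool.and_eq_true, decide_eq_true_iff] at hm
          obtain ⟨hu, hm2⟩ := hm
          rcases (by simpa using hm2) with h|h|h|h|h|h <;>
            exact hall (by
              rw [pv_recomb t _ 'l' hl rfl, pv_recomb _ _ '_' hu h]; decide))]
      · simp only [Bool.or_eq_true, hr, hl, or_self, Bool.false_eq_true, if_false]

-- ===== VERDICT (by name: the statement is the Claim_ definition above) =====
theorem detect_bodypart_mapping_spec : Claim_equal_detect_bodypart_mapping := by
  intro bps _
  unfold Spec_detect_bodypart_mapping detect_bodypart_mapping detect_bodypart_mapping_alt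
  simp only [pv_rule_eq_scan]
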